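-- pv_equiv track=rewrite | github.com/yaaszp/YaroshenkoQaPython | modules/common/general.py | check_string_on_special_symbols
-- ===== SOURCE A (Python) =====
-- def check_string_on_special_symbols(str):
--     temp = False
--     special_symbols = "~!@#$%^&*()}{:><?.,№/|"
--     for i in str:
--         for y in special_symbols:
--             if i == y:
--                 temp = True
--                 break
--     return temp
-- ===== SOURCE B (Python) =====
-- def check_string_on_special_symbols(str):
--     return bool(set(str) & set("~!@#$%^&*()}{:><?.,№/|"))
-- ===== Notes on version B (the rewrite author's own statement) =====
-- stated objective: idiomatic
-- what changed: Replaces the nested char-by-char scan with a boolean flag by building the set of the string's distinct characters and testing its intersection with the special-symbol set for non-emptiness.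
import Mathlib
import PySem

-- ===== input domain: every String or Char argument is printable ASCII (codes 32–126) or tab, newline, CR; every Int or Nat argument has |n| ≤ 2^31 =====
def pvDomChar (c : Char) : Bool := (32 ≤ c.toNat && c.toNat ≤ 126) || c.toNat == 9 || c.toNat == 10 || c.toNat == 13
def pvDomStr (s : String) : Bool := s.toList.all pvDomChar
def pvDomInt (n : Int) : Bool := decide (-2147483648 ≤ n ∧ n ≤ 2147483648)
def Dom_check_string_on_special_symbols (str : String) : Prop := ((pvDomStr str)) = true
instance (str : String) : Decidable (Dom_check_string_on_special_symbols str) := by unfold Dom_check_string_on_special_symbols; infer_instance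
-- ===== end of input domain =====

-- B replaces A's nested char-by-char scan with a boolean flag by a set intersection non-emptiness test (idiomatic).

-- ===== PORT A =====
-- inner loop 'for y in special_symbols: if i == y: temp = True; break'
def pvInnerA (i : Char) (ys : List Char) (temp : Bool) : Bool :=
  match ys with
  | [] => temp
  | y :: rest => if i == y then true else pvInnerA i rest temp

def check_string_on_special_symbols (str : String) : Bool :=
  let special_symbols := "~!@#$%^&*()}{:><?.,№/|"
  str.toList.foldl (fun temp i => pvInnerA i special_symbols.toList temp) false

-- ===== PORT B =====
def check_string_on_special_symbols_alt (str : String) : Bool :=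
  !((PySem.Set.inter (PySem.Set.ofList str.toList)
      (PySem.Set.ofList "~!@#$%^&*()}{:><?.,№/|".toList)).isEmpty)

-- ===== PRECONDITION & SPEC =====
def Spec_check_string_on_special_symbols (str : String) (out : Bool) : Prop := out = check_string_on_special_symbols_alt str
instance (str : String) (out : Bool) : Decidable (Spec_check_string_on_special_symbols str out) := by unfold Spec_check_string_on_special_symbols; infer_instance

-- ===== CLAIM (what is proved, stated in full; the proofs are below) =====
def Claim_equal_check_string_on_special_symbols : Prop := ∀ (str : String), Dom_check_string_on_special_symbols str → Spec_check_string_on_special_symbols str (check_string_on_special_symbols str)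

-- ===== LEMMAS AND PROOFS =====
-- A's inner loop returns true iff the flag was set or the character matches some special symbol.
theorem pvInnerA_eq (i : Char) (ys : List Char) (temp : Bool) :
    pvInnerA i ys temp = (ys.any (fun y => i == y) || temp) := by
  induction ys with
  | nil => simp [pvInnerA]
  | cons y rest ih =>
    by_cases h : i == y <;> simp [pvInnerA, h, ih]

-- A's outer loop is 'flag or some character matches some special symbol'.
theorem pvOuterA_eq (specials : List Char) (l : List Char) (temp : Bool) :
    l.foldl (fun temp i => pvInnerA i specials temp) temp
      = (temp || l.any (fun i => specials.any (fun y => i == y))) := by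
  induction l generalizing temp with
  | nil => simp
  | cons i rest ih =>
    rw [List.foldl_cons, ih, pvInnerA_eq]
    cases temp <;> simp [Bool.or_comm]

-- B's intersection is non-empty iff some character of the string is a special symbol.
theorem pvAltB_eq (s : String) :
    check_string_on_special_symbols_alt s
      = s.toList.any (fun i => "~!@#$%^&*()}{:><?.,№/|".toList.any (fun y => i == y)) := by
  unfold check_string_on_special_symbols_alt
  rw [Bool.eq_iff_iff]
  simp only [Bool.not_eq_true', List.isEmpty_eq_false_iff, List.any_eq_true, beq_iff_eq,
    ne_eq, List.eq_nil_iff_forall_not_mem, not_forall, not_not,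
    PySem.Set.mem_inter, PySem.Set.mem_ofList]
  constructor
  · rintro ⟨x, hx, hxs⟩; exact ⟨x, hx, x, hxs, rfl⟩
  · rintro ⟨i, hi, y, hy, rfl⟩; exact ⟨i, hi, hy⟩

-- ===== VERDICT (by name: the statement is the Claim_ definition above) =====
theorem check_string_on_special_symbols_spec : Claim_equal_check_string_on_special_symbols := by
  intro s _
  show check_string_on_special_symbols s = check_string_on_special_symbols_alt s
  unfold check_string_on_special_symbols
  rw [pvOuterA_eq, pvAltB_eq, Bool.false_or]
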